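-- pv_equiv track=rewrite | github.com/AkshaySingh-DS/DSA_CP_Python | SortingSearching/EKO.py | heightRequired
-- ===== SOURCE A (Python) =====
-- def iscutPossible(arr, threshold, mid):
--     cut = 0
--     for t in arr:
--         if t >= mid:
--             cut += (t - mid)
--
--         if cut >= threshold:
--             return True
--
--     return False
--
-- def heightRequired(arr, m, ub):
--     l = 0; r = ub
--     ans = -1
--     #logic
--
--     while l <= r:
--         mid = (l + r) //2
--         bool = iscutPossible(arr, m, mid)
--         if bool:
--             #increase sawblade height -> move right
--             ans = mid
--             l = mid + 1
--         else:
--             #decrease sawblade height -> move left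
--             r = mid - 1
--
--     return ans
-- ===== SOURCE B (Python) =====
-- def heightRequired(arr, m, ub):
--     # sorted array + suffix sums: feasibility per blade height in O(log n)
--     if not arr:
--         return -1
--     s = sorted(arr)
--     n = len(s)
--     suf = [0] * (n + 1)
--     for i in range(n - 1, -1, -1):
--         suf[i] = suf[i + 1] + s[i]
--
--     def first_gt(x):
--         # first index whose value exceeds x (hand-written bisect_right)
--         lo, hi = 0, n
--         while lo < hi:
--             mid = (lo + hi) // 2
--             if s[mid] <= x:
--                 lo = mid + 1
--             else:
--                 hi = mid
--         return lo
--
--     def feasible(h):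
--         i = first_gt(h)
--         return suf[i] - h * (n - i) >= m
--
--     lo, hi, ans = 0, ub, -1
--     while lo <= hi:
--         mid = (lo + hi) // 2
--         if feasible(mid):
--             ans = mid
--             lo = mid + 1
--         else:
--             hi = mid - 1
--     return ans
-- ===== Notes on version B (the rewrite author's own statement) =====
-- stated objective: alternative
-- what changed: Replaces A's linear early-exit feasibility scan inside the binary search by a sorted copy with suffix sums and a hand-written bisect, so each feasibility test is an O(log n) lookup instead of an O(n) pass.
import Mathlib
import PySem

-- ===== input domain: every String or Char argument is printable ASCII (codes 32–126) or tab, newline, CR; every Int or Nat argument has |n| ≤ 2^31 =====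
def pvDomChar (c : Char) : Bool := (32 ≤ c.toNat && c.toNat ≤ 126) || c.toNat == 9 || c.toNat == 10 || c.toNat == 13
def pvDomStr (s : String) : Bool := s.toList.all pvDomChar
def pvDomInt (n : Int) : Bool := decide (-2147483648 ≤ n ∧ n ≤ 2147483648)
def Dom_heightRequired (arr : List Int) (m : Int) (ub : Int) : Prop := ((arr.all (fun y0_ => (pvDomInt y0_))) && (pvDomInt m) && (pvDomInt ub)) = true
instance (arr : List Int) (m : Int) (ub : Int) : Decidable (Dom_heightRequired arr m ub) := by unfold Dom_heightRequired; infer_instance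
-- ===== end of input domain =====

-- B keeps A's binary search on the blade height but replaces the linear early-exit
-- feasibility scan by a sorted copy + suffix sums + hand-written bisect (objective: alternative).
-- Equivalence of the two is proved for the RETURN value on all inputs (both are total).

-- ===== PORT A =====

-- A's iscutPossible: early-exit accumulation loop, cut is the accumulator
def pvIscutLoop (threshold mid : Int) : List Int → Int → Bool
  | [], _ => false
  | t :: ts, cut =>
    let cut' := if mid ≤ t then cut + (t - mid) else cut
    if threshold ≤ cut' then true else pvIscutLoop threshold mid ts cut'

def iscutPossible (arr : List Int) (threshold mid : Int) : Bool :=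
  pvIscutLoop threshold mid arr 0

-- A's while l <= r loop
def pvLoopA (arr : List Int) (m : Int) (l r ans : Int) : Int :=
  if h : l ≤ r then
    let mid := PySem.Int.floordiv (l + r) 2
    if iscutPossible arr m mid then pvLoopA arr m (mid + 1) r mid
    else pvLoopA arr m l (mid - 1) ans
  else ans
termination_by (r + 1 - l).toNat
decreasing_by
  · have := PySem.Int.floordiv_two_mid_bounds h; omega
  · have := PySem.Int.floordiv_two_mid_bounds h; omega

def heightRequired (arr : List Int) (m : Int) (ub : Int) : Int :=
  pvLoopA arr m 0 ub (-1)

-- ===== PORT B =====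

-- suffix sums suf with suf[i] = s[i] + s[i+1] + …, suf[n] = 0, built right to left
def pvSuf : List Int → List Int
  | [] => [0]
  | x :: xs => (x + (pvSuf xs).headD 0) :: pvSuf xs

-- hand-written bisect loop first_gt: first index of s whose value exceeds x
-- (the index mid is always in range in Source B, so the pyGetD default 0 is never used)
def pvFirstGt (s : List Int) (x lo hi : Int) : Int :=
  if h : lo < hi then
    let mid := PySem.Int.floordiv (lo + hi) 2
    if PySem.List.pyGetD s mid 0 ≤ x then pvFirstGt s x (mid + 1) hi
    else pvFirstGt s x lo mid
  else lo
termination_by (hi - lo).toNat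
decreasing_by
  · have := PySem.Int.floordiv_two_mid_bounds (le_of_lt h); omega
  · have h2 : PySem.Int.floordiv (lo + hi) 2 < hi :=
      (PySem.Int.floordiv_lt_iff_lt_mul (by omega)).mpr (by omega)
    have := PySem.Int.floordiv_two_mid_bounds (le_of_lt h); omega

-- feasible(h): all wood above height h, via the suffix sum at the bisect index
def pvFeasible (s suf : List Int) (n m h : Int) : Bool :=
  let i := pvFirstGt s h 0 n
  decide (m ≤ PySem.List.pyGetD suf i 0 - h * (n - i))

-- B's while lo <= hi loop
def pvLoopB (s suf : List Int) (n m lo hi ans : Int) : Int :=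
  if h : lo ≤ hi then
    let mid := PySem.Int.floordiv (lo + hi) 2
    if pvFeasible s suf n m mid then pvLoopB s suf n m (mid + 1) hi mid
    else pvLoopB s suf n m lo (mid - 1) ans
  else ans
termination_by (hi + 1 - lo).toNat
decreasing_by
  · have := PySem.Int.floordiv_two_mid_bounds h; omega
  · have := PySem.Int.floordiv_two_mid_bounds h; omega

def heightRequired_alt (arr : List Int) (m : Int) (ub : Int) : Int :=
  if arr = [] then -1
  else
    let s := PySem.List.sorted arr (fun t => t) false
    let n : Int := s.length
    let suf := pvSuf s
    pvLoopB s suf n m 0 ub (-1)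

-- ===== PRECONDITION & SPEC =====
def Spec_heightRequired (arr : List Int) (m : Int) (ub : Int) (out : Int) : Prop := out = heightRequired_alt arr m ub
instance (arr : List Int) (m : Int) (ub : Int) (out : Int) : Decidable (Spec_heightRequired arr m ub out) := by unfold Spec_heightRequired; infer_instance

-- ===== CLAIM (what is proved, stated in full; the proofs are below) =====
def Claim_equal_heightRequired : Prop := ∀ (arr : List Int) (m : Int) (ub : Int), Dom_heightRequired arr m ub → Spec_heightRequired arr m ub (heightRequired arr m ub)

-- ===== LEMMAS AND PROOFS =====

-- total wood cut at blade height h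
def pvCut (arr : List Int) (h : Int) : Int := (arr.map (fun t => max (t - h) 0)).sum

theorem pvCut_nonneg (arr : List Int) (h : Int) : 0 ≤ pvCut arr h := by
  apply List.sum_nonneg
  intro x hx
  simp only [List.mem_map] at hx
  obtain ⟨t, -, rfl⟩ := hx
  exact le_max_right _ _

-- A's early-exit scan decides "arr nonempty and total cut ≥ threshold"
theorem pvIscutLoop_eq (threshold mid : Int) (arr : List Int) (cut : Int) :
    pvIscutLoop threshold mid arr cut = decide (arr ≠ [] ∧ threshold ≤ cut + pvCut arr mid) := by
  induction arr generalizing cut with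
  | nil => simp [pvIscutLoop]
  | cons t ts ih =>
    have hcut : (if mid ≤ t then cut + (t - mid) else cut) = cut + max (t - mid) 0 := by
      split_ifs with h <;> omega
    have hts : 0 ≤ pvCut ts mid := pvCut_nonneg ts mid
    have hsplit : pvCut (t :: ts) mid = max (t - mid) 0 + pvCut ts mid := by
      simp [pvCut]
    simp only [pvIscutLoop, hcut]
    by_cases h : threshold ≤ cut + max (t - mid) 0
    · have : threshold ≤ cut + pvCut (t :: ts) mid := by omega
      simp [h, this]
    · simp only [h, if_false, ih]
      cases ts with
      | nil =>
        have : ¬ threshold ≤ cut + pvCut [t] mid := by simp [pvCut] at *; omega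
        simp [this]
      | cons u us =>
        have he : cut + max (t - mid) 0 + pvCut (u :: us) mid
            = cut + pvCut (t :: u :: us) mid := by rw [hsplit]; ring
        simp only [ne_eq, reduceCtorEq, not_false_iff, true_and, he]

-- suffix-sum lookup
theorem pvSuf_get (s : List Int) (i : Int) (h0 : 0 ≤ i) (h1 : i ≤ s.length) :
    PySem.List.pyGetD (pvSuf s) i 0 = (s.drop i.toNat).sum := by
  rw [PySem.List.pyGetD_of_nonneg _ _ h0]
  have key : ∀ (s : List Int) (k : Nat), k ≤ s.length → (pvSuf s).getD k 0 = (s.drop k).sum := by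
    intro s
    induction s with
    | nil =>
      intro k hk
      have hk0 : k = 0 := by simpa using hk
      subst hk0; simp [pvSuf]
    | cons x xs ih =>
      intro k hk
      cases k with
      | zero =>
        have h0' := ih 0 (by omega)
        cases hxs : pvSuf xs with
        | nil => exfalso; cases xs <;> simp [pvSuf] at hxs
        | cons a l =>
          rw [hxs] at h0'; simp at h0'
          simp [pvSuf, hxs, h0']
      | succ j => simpa [pvSuf] using ih j (by simpa using hk)
  exact key s i.toNat (by omega)

-- bisect correctness on a sorted list
theorem pvFirstGt_spec (s : List Int) (x : Int)
    (hs : s.Pairwise (· ≤ ·)) (lo hi : Int) :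
    0 ≤ lo → hi ≤ s.length → lo ≤ hi →
    (∀ j : Nat, j < lo.toNat → s.getD j 0 ≤ x) →
    (∀ j : Nat, hi.toNat ≤ j → j < s.length → x < s.getD j 0) →
    lo ≤ pvFirstGt s x lo hi ∧ pvFirstGt s x lo hi ≤ hi ∧
      (∀ j : Nat, j < (pvFirstGt s x lo hi).toNat → s.getD j 0 ≤ x) ∧
      (∀ j : Nat, (pvFirstGt s x lo hi).toNat ≤ j → j < s.length → x < s.getD j 0) := by
  have mono : ∀ p q : Nat, p ≤ q → q < s.length → s.getD p 0 ≤ s.getD q 0 := by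
    intro p q hpq hq
    rcases Nat.eq_or_lt_of_le hpq with rfl | hlt
    · exact le_refl _
    · rw [List.getD_eq_getElem _ _ (lt_of_le_of_lt hpq hq), List.getD_eq_getElem _ _ hq]
      exact List.pairwise_iff_getElem.mp hs p q _ _ hlt
  fun_induction pvFirstGt s x lo hi with
  | case1 lo hi h mid hcond ih =>
    intro h0 hlen hlh hbelow habove
    have hb := PySem.Int.floordiv_two_mid_bounds (le_of_lt h)
    have hmlt : mid < hi :=
      (PySem.Int.floordiv_lt_iff_lt_mul (by omega)).mpr (by omega)
    have hmr : mid.toNat < s.length := by omega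
    rw [PySem.List.pyGetD_of_nonneg _ _ (by omega)] at hcond
    have hbelow' : ∀ j : Nat, j < (mid + 1).toNat → s.getD j 0 ≤ x := by
      intro j hj
      exact le_trans (mono j mid.toNat (by omega) hmr) hcond
    obtain ⟨ha, hb', hc, hd⟩ := ih (by omega) hlen (by omega) hbelow' habove
    exact ⟨by omega, hb', hc, hd⟩
  | case2 lo hi h mid hcond ih =>
    intro h0 hlen hlh hbelow habove
    have hb := PySem.Int.floordiv_two_mid_bounds (le_of_lt h)
    have hmlt : mid < hi :=
      (PySem.Int.floordiv_lt_iff_lt_mul (by omega)).mpr (by omega)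
    have hmr : mid.toNat < s.length := by omega
    rw [PySem.List.pyGetD_of_nonneg _ _ (by omega)] at hcond
    have habove' : ∀ j : Nat, mid.toNat ≤ j → j < s.length → x < s.getD j 0 := by
      intro j hj hjl
      exact lt_of_not_ge (fun hge => hcond (le_trans (mono mid.toNat j hj hjl) hge))
    obtain ⟨ha, hb', hc, hd⟩ := ih (by omega) (by omega) (by omega) hbelow habove'
    exact ⟨ha, by omega, hc, hd⟩
  | case3 lo hi h =>
    intro h0 hlen hlh hbelow habove
    have : lo = hi := by omega
    exact ⟨le_refl _, by omega, hbelow, by rw [this]; exact habove⟩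

-- Σ (t - h) over a list
theorem pvSumSub (l : List Int) (h : Int) :
    (l.map (fun t => t - h)).sum = l.sum - h * l.length := by
  induction l with
  | nil => simp
  | cons a l ih => simp [ih]; ring

-- the suffix-sum expression computes the total cut
theorem pvFeasible_eq_cut (s suf : List Int) (h : Int)
    (hs : s.Pairwise (· ≤ ·)) (hsuf : suf = pvSuf s) (m : Int) :
    pvFeasible s suf s.length m h = decide (m ≤ pvCut s h) := by
  subst hsuf
  obtain ⟨h1, h2, hbelow, habove⟩ :=
    pvFirstGt_spec s h hs 0 (s.length) (le_refl 0) (le_refl _) (by positivity)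
      (by intro j hj; omega) (by intro j hj hjl; omega)
  set i := pvFirstGt s h 0 (s.length) with hi
  set k := i.toNat with hk
  have hkl : k ≤ s.length := by omega
  have hik : (k : Int) = i := by omega
  have hdrop : ∀ j : Nat, j < (s.drop k).length → h < (s.drop k).getD j 0 := by
    intro j hj
    rw [List.getD_eq_getElem _ _ hj, List.getElem_drop]
    have := habove (k + j) (by omega) (by simp at hj; omega)
    rwa [List.getD_eq_getElem _ _ (by simp at hj; omega)] at this
  have hcut_drop : pvCut (s.drop k) h = (s.drop k).sum - h * (s.drop k).length := by
    rw [pvCut, ← pvSumSub]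
    congr 1
    apply List.map_congr_left
    intro t ht
    obtain ⟨j, hj, rfl⟩ := List.mem_iff_getElem.mp ht
    have := hdrop j hj
    rw [List.getD_eq_getElem _ _ hj] at this
    omega
  have hcut_take : pvCut (s.take k) h = 0 := by
    apply List.sum_eq_zero
    intro y hy
    simp only [List.mem_map] at hy
    obtain ⟨t, ht, rfl⟩ := hy
    obtain ⟨j, hj, rfl⟩ := List.mem_iff_getElem.mp ht
    have hjk : j < k := by simp at hj; omega
    have hjl : j < s.length := by simp at hj; omega
    have := hbelow j (by omega)
    rw [List.getD_eq_getElem _ _ hjl] at this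
    rw [List.getElem_take] at *
    omega
  have hsplit : pvCut s h = pvCut (s.take k) h + pvCut (s.drop k) h := by
    conv_lhs => rw [pvCut, ← List.take_append_drop k s]
    rw [List.map_append, List.sum_append]; rfl
  have hget : PySem.List.pyGetD (pvSuf s) i 0 = (s.drop k).sum :=
    pvSuf_get s i (by omega) (by omega)
  simp only [pvFeasible, ← hi, hget]
  have hlen : ((s.drop k).length : Int) = (s.length : Int) - i := by
    simp [List.length_drop]; omega
  have : (s.drop k).sum - h * ((s.length : Int) - i) = pvCut s h := by
    rw [hsplit, hcut_take, hcut_drop, ← hlen]; ring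
  rw [this]

-- feasibility agreement for nonempty arr
theorem pvFeasible_eq_iscut (arr : List Int) (hne : arr ≠ []) (m h : Int) :
    pvFeasible (PySem.List.sorted arr (fun t => t) false) (pvSuf (PySem.List.sorted arr (fun t => t) false))
      ((PySem.List.sorted arr (fun t => t) false).length) m h = iscutPossible arr m h := by
  set s := PySem.List.sorted arr (fun t => t) false with hsdef
  have hs : s.Pairwise (· ≤ ·) := by
    simpa using PySem.List.sorted_pairwise arr (fun t => t)
  have hperm : s.Perm arr := PySem.List.sorted_perm arr (fun t => t) false
  have hcuteq : pvCut s h = pvCut arr h := (hperm.map (fun t => max (t - h) 0)).sum_eq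
  rw [pvFeasible_eq_cut s _ h hs rfl m, iscutPossible, pvIscutLoop_eq]
  simp [hne, hcuteq]

-- the two binary-search loops agree (nonempty arr)
theorem pvLoop_eq (arr : List Int) (hne : arr ≠ []) (m : Int) (l r ans : Int) :
    pvLoopA arr m l r ans =
      pvLoopB (PySem.List.sorted arr (fun t => t) false) (pvSuf (PySem.List.sorted arr (fun t => t) false))
        ((PySem.List.sorted arr (fun t => t) false).length) m l r ans := by
  fun_induction pvLoopA arr m l r ans with
  | case1 l r ans h mid hcond ih =>
    rw [pvLoopB]
    have hcond' : iscutPossible arr m (PySem.Int.floordiv (l + r) 2) = true := hcond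
    simp only [dif_pos h, pvFeasible_eq_iscut arr hne m, hcond', if_true]
    exact ih
  | case2 l r ans h mid hcond ih =>
    rw [pvLoopB]
    have hcond' : ¬ iscutPossible arr m (PySem.Int.floordiv (l + r) 2) = true := hcond
    simp only [dif_pos h, pvFeasible_eq_iscut arr hne m, hcond']
    exact ih
  | case3 l r ans h =>
    rw [pvLoopB]
    simp [h]

-- A's loop on the empty list never finds a cut
theorem pvLoopA_nil (m : Int) (l r ans : Int) : pvLoopA [] m l r ans = ans := by
  fun_induction pvLoopA [] m l r ans with
  | case1 l r ans h mid hcond ih => simp [iscutPossible, pvIscutLoop] at hcond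
  | case2 l r ans h mid hcond ih => exact ih
  | case3 l r ans h => rfl

-- ===== VERDICT (by name: the statement is the Claim_ definition above) =====
theorem heightRequired_spec : Claim_equal_heightRequired := by
  intro arr m ub _
  unfold Spec_heightRequired heightRequired heightRequired_alt
  by_cases hne : arr = []
  · subst hne; simp [pvLoopA_nil]
  · simp only [hne, if_false]
    exact pvLoop_eq arr hne m 0 ub (-1)
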